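-- pv_equiv track=rewrite | github.com/bgoodlab/microbiome_ecoevo_correlations | analysis.py | calculate_host_classifications
-- ===== SOURCE A (Python) =====
-- def collate_within_host_events(within_host_events):
--
--     host_event_map = {}
--
--     for record_idx in range(0,len(within_host_events)):
--
--         cohort,subject,t0,t1,species,event = within_host_events[record_idx]
--
--         host_record = (cohort,subject,t0,t1)
--
--         if host_record not in host_event_map:
--             host_event_map[host_record] = []
--
--         host_event_map[host_record].append((species,event))
--
--     return host_event_map
--
-- def calculate_host_classifications(within_host_events):
--
--     host_event_map = collate_within_host_events(within_host_events)
--     host_classification_map = {}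
--     for host_record in host_event_map:
--
--         host_event = 0
--         for species,event in host_event_map[host_record]:
--             if event>0 and host_event==0:
--                 host_event = event
--             if event==2:
--                 host_event = event
--
--         host_classification_map[host_record] = host_event
--
--     return host_classification_map
-- ===== SOURCE B (Python) =====
-- def calculate_host_classifications(within_host_events):
--     # One pass: per host keep only (seen a 2?, first positive event); no per-host event lists.
--     acc = {}
--     for cohort, subject, t0, t1, species, event in within_host_events:
--         key = (cohort, subject, t0, t1)
--         seen2, firstpos = acc.get(key, (False, 0))
--         acc[key] = (seen2 or event == 2,
--                     firstpos if firstpos > 0 else (event if event > 0 else 0))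
--     return {key: (2 if seen2 else firstpos) for key, (seen2, firstpos) in acc.items()}
-- ===== Notes on version B (the rewrite author's own statement) =====
-- stated objective: simpler
-- what changed: Instead of collating per-host event lists and then running a stateful two-branch fold over each list, B makes a single pass keeping only a (seen-a-2, first-positive) pair per host and reads the classification off that pair.
import Mathlib
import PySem

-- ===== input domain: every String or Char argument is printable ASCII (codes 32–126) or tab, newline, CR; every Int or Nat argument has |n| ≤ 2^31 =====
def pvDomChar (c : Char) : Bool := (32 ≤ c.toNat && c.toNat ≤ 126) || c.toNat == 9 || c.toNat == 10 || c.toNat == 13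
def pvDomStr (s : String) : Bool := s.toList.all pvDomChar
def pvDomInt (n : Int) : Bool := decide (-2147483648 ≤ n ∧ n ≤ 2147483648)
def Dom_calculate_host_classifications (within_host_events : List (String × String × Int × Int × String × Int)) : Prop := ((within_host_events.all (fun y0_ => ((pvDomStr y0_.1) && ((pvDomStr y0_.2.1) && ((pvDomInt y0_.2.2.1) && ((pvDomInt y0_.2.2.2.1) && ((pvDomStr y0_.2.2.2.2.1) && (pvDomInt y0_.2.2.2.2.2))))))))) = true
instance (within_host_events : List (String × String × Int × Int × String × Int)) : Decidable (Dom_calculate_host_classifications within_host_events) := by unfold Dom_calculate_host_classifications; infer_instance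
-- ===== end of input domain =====

-- B replaces A's collate-then-fold (per-host event lists, stateful inner loop) by a single pass
-- that keeps only a (seen-a-2, first-positive-event) pair per host: simpler, no intermediate lists.

-- ===== PORT A =====
-- A helper of A: group events by (cohort, subject, t0, t1) into per-host lists (dict of lists).
def collate_within_host_events (within_host_events : List (String × String × Int × Int × String × Int)) : PySem.Dict (String × String × Int × Int) (List (String × Int)) :=
  within_host_events.foldl (fun d e =>
    let host_record := (e.1, e.2.1, e.2.2.1, e.2.2.2.1)
    let d1 := if d.contains host_record then d else d.insert host_record []
    d1.modify host_record [] (fun xs => xs ++ [(e.2.2.2.2.1, e.2.2.2.2.2)]))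
    PySem.Dict.empty

def calculate_host_classifications (within_host_events : List (String × String × Int × Int × String × Int)) : List (String × String × Int × Int × Int) :=
  let host_event_map := collate_within_host_events within_host_events
  let host_classification_map :=
    host_event_map.keys.foldl (fun c host_record =>
      let host_event := (host_event_map.getD host_record []).foldl (fun h sv =>
          let h1 := if sv.2 > 0 && h == 0 then sv.2 else h
          if sv.2 == 2 then sv.2 else h1) 0
      c.insert host_record host_event) PySem.Dict.empty
  host_classification_map.items.map (fun p => (p.1.1, p.1.2.1, p.1.2.2.1, p.1.2.2.2, p.2))

-- ===== PORT B =====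
def calculate_host_classifications_alt (within_host_events : List (String × String × Int × Int × String × Int)) : List (String × String × Int × Int × Int) :=
  let acc := within_host_events.foldl (fun acc e =>
    let key := (e.1, e.2.1, e.2.2.1, e.2.2.2.1)
    let p := acc.getD key (false, (0 : Int))
    acc.insert key (p.1 || e.2.2.2.2.2 == 2,
      if p.2 > 0 then p.2 else if e.2.2.2.2.2 > 0 then e.2.2.2.2.2 else 0))
    PySem.Dict.empty
  acc.items.map (fun p => (p.1.1, p.1.2.1, p.1.2.2.1, p.1.2.2.2, if p.2.1 then (2 : Int) else p.2.2))

-- ===== PRECONDITION & SPEC =====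
def Spec_calculate_host_classifications (within_host_events : List (String × String × Int × Int × String × Int)) (out : List (String × String × Int × Int × Int)) : Prop := out = calculate_host_classifications_alt within_host_events
instance (within_host_events : List (String × String × Int × Int × String × Int)) (out : List (String × String × Int × Int × Int)) : Decidable (Spec_calculate_host_classifications within_host_events out) := by unfold Spec_calculate_host_classifications; infer_instance

-- ===== CLAIM (what is proved, stated in full; the proofs are below) =====
def Claim_equal_calculate_host_classifications : Prop := ∀ (within_host_events : List (String × String × Int × Int × String × Int)), Dom_calculate_host_classifications within_host_events → Spec_calculate_host_classifications within_host_events (calculate_host_classifications within_host_events)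

-- ===== LEMMAS AND PROOFS =====

-- abbreviations for the proofs
def pvKey (e : String × String × Int × Int × String × Int) : String × String × Int × Int := (e.1, e.2.1, e.2.2.1, e.2.2.2.1)
def pvVal (e : String × String × Int × Int × String × Int) : String × Int := (e.2.2.2.2.1, e.2.2.2.2.2)
def pvAStep (h : Int) (sv : String × Int) : Int :=
  let h1 := if sv.2 > 0 && h == 0 then sv.2 else h
  if sv.2 == 2 then sv.2 else h1
def pvBStep (p : Bool × Int) (sv : String × Int) : Bool × Int :=
  (p.1 || sv.2 == 2, if p.2 > 0 then p.2 else if sv.2 > 0 then sv.2 else 0)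

-- A's conditional-insert-then-modify step equals a plain modify.
lemma modify_eq_insert (d : PySem.Dict (String × String × Int × Int) (List (String × Int)))
    (k : String × String × Int × Int) (d0 : List (String × Int)) (f : List (String × Int) → List (String × Int)) :
    d.modify k d0 f = d.insert k (f (d.getD k d0)) := rfl

-- A's conditional-insert-then-modify step equals a plain modify.
lemma collate_step_eq (d : PySem.Dict (String × String × Int × Int) (List (String × Int)))
    (k : String × String × Int × Int) (x : String × Int) :
    (if d.contains k then d else d.insert k []).modify k [] (fun xs => xs ++ [x])
      = d.modify k [] (fun xs => xs ++ [x]) := by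
  by_cases h : d.contains k = true
  · simp [h]
  · have h' : d.contains k = false := by simpa using h
    rw [if_neg (by simp [h']), modify_eq_insert, modify_eq_insert,
      PySem.Dict.insert_insert_self, PySem.Dict.getD_insert_self,
      PySem.Dict.getD_of_not_contains d _ h']

-- value of B's grouping fold at a key: fold of pvBStep over that key's events.
lemma getD_foldl_insert_comb {κ : Type} [BEq κ] [LawfulBEq κ] [DecidableEq κ] {β ν : Type}
    (l : List β) (key : β → κ) (f : ν → β → ν) (d : PySem.Dict κ ν) (k : κ) (d0 : ν) :
    (l.foldl (fun d e => d.insert (key e) (f (d.getD (key e) d0) e)) d).getD k d0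
      = (l.filter (fun e => key e == k)).foldl f (d.getD k d0) := by
  induction l generalizing d with
  | nil => rfl
  | cons e t ih =>
    simp only [List.foldl_cons, List.filter_cons]
    by_cases hk : key e == k
    · have hk' : k = key e := (eq_of_beq hk).symm
      subst hk'
      rw [ih, PySem.Dict.getD_insert_self]
      simp only [beq_self_eq_true, if_true, List.foldl_cons]
    · have hk' : k ≠ key e := fun h => hk (beq_iff_eq.mpr h.symm)
      rw [ih, PySem.Dict.getD_insert_of_ne _ _ _ hk', if_neg hk]

-- the inner equivalence: A's stateful fold vs B's (seen2, firstpos) pair.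
lemma inner_fold (evs : List (String × Int)) :
    ∀ (s2 : Bool) (fp : Int), 0 ≤ fp →
      (evs.foldl pvAStep (if s2 then 2 else fp)
          = (if (evs.foldl pvBStep (s2, fp)).1 then 2 else (evs.foldl pvBStep (s2, fp)).2))
        ∧ 0 ≤ (evs.foldl pvBStep (s2, fp)).2 := by
  induction evs with
  | nil => intro s2 fp hfp; exact ⟨rfl, hfp⟩
  | cons sv t ih =>
    intro s2 fp hfp
    simp only [List.foldl_cons]
    have hstep : pvAStep (if s2 then 2 else fp) sv
        = (if (pvBStep (s2, fp) sv).1 then 2 else (pvBStep (s2, fp) sv).2) := by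
      simp only [pvAStep, pvBStep]
      cases s2 <;> by_cases h2 : sv.2 = 2 <;> by_cases hp : sv.2 > 0 <;>
        by_cases hf : fp > 0 <;> by_cases hf0 : fp = 0 <;>
        simp_all <;> omega
    have hfp' : 0 ≤ (pvBStep (s2, fp) sv).2 := by
      simp only [pvBStep]; split_ifs <;> omega
    obtain ⟨e1, e2⟩ := ih (pvBStep (s2, fp) sv).1 (pvBStep (s2, fp) sv).2 hfp'
    constructor
    · rw [hstep, e1]
    · exact e2

theorem calculate_host_classifications_spec_proof :
    ∀ (l : List (String × String × Int × Int × String × Int)),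
      calculate_host_classifications l = calculate_host_classifications_alt l := by
  intro l
  -- normalise A's collate fold to a plain modify fold over (key, val) pairs
  have hcol : collate_within_host_events l
      = (l.map (fun e => (pvKey e, pvVal e))).foldl
          (fun d p => d.modify p.1 [] (fun xs => xs ++ [p.2])) PySem.Dict.empty := by
    rw [List.foldl_map]
    unfold collate_within_host_events
    apply PySem.List.foldl_congr_mem
    intro d e _
    exact collate_step_eq d (pvKey e) (pvVal e)
  -- normalise B's fold to the insert-comb shape
  have hB : calculate_host_classifications_alt l
      = (l.foldl (fun d e => d.insert (pvKey e)
            (pvBStep (d.getD (pvKey e) (false, 0)) (pvVal e))) PySem.Dict.empty).items.map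
          (fun p => (p.1.1, p.1.2.1, p.1.2.2.1, p.1.2.2.2, if p.2.1 then (2 : Int) else p.2.2)) := rfl
  set key := pvKey with hkeydef
  -- keys of both grouping dicts
  have hkeysA : (collate_within_host_events l).keys = PySem.Set.ofList (l.map key) := by
    rw [hcol, PySem.Dict.keys_foldl_modify_key, PySem.Dict.keys_empty, List.map_map,
      PySem.Set.update_nil_left]
    simp [Function.comp_def]
  have hkeysB : (l.foldl (fun d e => d.insert (key e)
        (pvBStep (d.getD (key e) (false, 0)) (pvVal e))) PySem.Dict.empty).keys
      = PySem.Set.ofList (l.map key) := by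
    rw [PySem.Dict.keys_foldl_insert_key, PySem.Dict.keys_empty, PySem.Set.update_nil_left]
  have hnodup : (PySem.Set.ofList (l.map key)).Nodup := PySem.Set.nodup_ofList _
  -- values of A's collate dict
  have hvalA : ∀ k, (collate_within_host_events l).getD k []
      = ((l.filter (fun e => key e == k)).map pvVal) := by
    intro k
    rw [hcol, PySem.Dict.getD_foldl_modify_append, PySem.Dict.getD_empty]
    simp [List.filter_map, Function.comp_def]
  -- values of B's dict
  have hvalB : ∀ k, (l.foldl (fun d e => d.insert (key e)
        (pvBStep (d.getD (key e) (false, 0)) (pvVal e))) PySem.Dict.empty).getD k (false, 0)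
      = (l.filter (fun e => key e == k)).foldl (fun p e => pvBStep p (pvVal e)) (false, 0) := by
    intro k
    rw [getD_foldl_insert_comb l key (fun p e => pvBStep p (pvVal e)) PySem.Dict.empty k (false, 0),
      PySem.Dict.getD_empty]
  -- A's classification dict: fresh distinct keys inserted into empty
  have hitemsA : (((collate_within_host_events l)).keys.foldl (fun c k =>
        c.insert k (((collate_within_host_events l).getD k []).foldl pvAStep 0)) PySem.Dict.empty).items
      = ((collate_within_host_events l)).keys.map (fun k =>
          (k, ((collate_within_host_events l).getD k []).foldl pvAStep 0)) := by
    have := PySem.Dict.items_foldl_insert_fresh ((collate_within_host_events l)).keys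
      (fun k => k) (fun k => ((collate_within_host_events l).getD k []).foldl pvAStep 0)
      PySem.Dict.empty (fun a _ => PySem.Dict.contains_empty a)
      (by rw [hkeysA]; simpa using hnodup)
    simpa using this
  -- B's items
  have hitemsB : (l.foldl (fun d e => d.insert (key e)
        (pvBStep (d.getD (key e) (false, 0)) (pvVal e))) PySem.Dict.empty).items
      = (PySem.Set.ofList (l.map key)).map (fun k =>
          (k, (l.filter (fun e => key e == k)).foldl (fun p e => pvBStep p (pvVal e)) (false, 0))) := by
    rw [PySem.Dict.items_eq_map_keys _ (by rw [hkeysB]; exact hnodup) (false, 0), hkeysB]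
    exact List.map_congr_left (fun k _ => by rw [hvalB k])
  -- assemble
    -- A's body literally is the keys-fold over collate
  show (((collate_within_host_events l)).keys.foldl (fun c k =>
        c.insert k (((collate_within_host_events l).getD k []).foldl
          (fun h sv => let h1 := if sv.2 > 0 && h == 0 then sv.2 else h
                       if sv.2 == 2 then sv.2 else h1) 0)) PySem.Dict.empty).items.map
      (fun p => (p.1.1, p.1.2.1, p.1.2.2.1, p.1.2.2.2, p.2))
    = calculate_host_classifications_alt l
  rw [hB]
  have hAstep : (fun (h : Int) (sv : String × Int) =>
      let h1 := if sv.2 > 0 && h == 0 then sv.2 else h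
      if sv.2 == 2 then sv.2 else h1) = pvAStep := rfl
  rw [hAstep, hitemsA, hitemsB, hkeysA, List.map_map, List.map_map]
  apply List.map_congr_left
  intro k _
  simp only [Function.comp_def]
  have h1 := (inner_fold ((l.filter (fun e => key e == k)).map pvVal) false 0 le_rfl).1
  simp only [Bool.false_eq_true, if_false] at h1
  rw [List.foldl_map] at h1
  rw [hvalA k, List.foldl_map, h1, List.foldl_map]

-- ===== VERDICT (by name: the statement is the Claim_ definition above) =====
theorem calculate_host_classifications_spec : Claim_equal_calculate_host_classifications := by
  intro l _
  exact calculate_host_classifications_spec_proof l
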